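-- pv_equiv track=rewrite | github.com/kouyalong/StudyCode | python_data_structure/zhixianyun-kyl.py | equality_distribution
-- ===== SOURCE A (Python) =====
-- from typing import List
--
-- def equality_distribution(
--         assembly_lines: List[int], month: int) -> int:
--     """
--     第一题：优化生产线产量
--     :param assembly_lines: 流水线产量
--     :param month: 优化月份
--     :return: 优化
--     """
--     max_index = 0
--
--     # 找到产量最大的
--     n = len(assembly_lines)
--     for i in range(1, n):
--         if assembly_lines[max_index] < assembly_lines[i]:
--             max_index = i
--
--     for _ in range(month):
--         # 产量最大的生产线减去 n-1 产量
--         assembly_lines[max_index] -= (n - 1)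
--         new_max_index = 0
--         for i in range(n):
--             if max_index != i:
--                 # 其他生产线 产量各+1
--                 assembly_lines[i] += 1
--             # 在变更后的产量里面找最大的 生产线
--             # 如果最大产量有相同的生产线，取index靠前的
--             if assembly_lines[i] > assembly_lines[new_max_index]:
--                 new_max_index = i
--         max_index = new_max_index
--     return assembly_lines
-- ===== SOURCE B (Python) =====
-- from typing import List
--
-- def equality_distribution(assembly_lines: List[int], month: int) -> List[int]:
--     # Cycle detection: each monthly step preserves the total sum, so the state
--     # sequence is eventually periodic.  Simulate one step at a time while
--     # memoising every state seen; on the first repeated state jump ahead by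
--     # (month - k) % period steps instead of simulating the remaining months.
--     # Mutates assembly_lines in place (slice assignment), like A; the proved
--     # equivalence is about the returned value.
--     n = len(assembly_lines)
--
--     def step(v):
--         m = v.index(max(v))
--         v = [x + 1 for x in v]
--         v[m] -= n
--         return v
--
--     seen = {}
--     v = list(assembly_lines)
--     k = 0
--     while k < month:
--         key = tuple(v)
--         if key in seen:
--             period = k - seen[key]
--             for _ in range((month - k) % period):
--                 v = step(v)
--             break
--         seen[key] = k
--         v = step(v)
--         k += 1
--     assembly_lines[:] = v
--     return assembly_lines
-- ===== Notes on version B (the rewrite author's own statement) =====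
-- stated objective: alternative
-- what changed: A simulates all `month` redistribution rounds unconditionally; B detects that the step preserves the total sum and is therefore eventually periodic, memoises every state in a dict and, on the first repeat, jumps ahead by (month-k) % period steps, making the work independent of month once a cycle appears.
import Mathlib
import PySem

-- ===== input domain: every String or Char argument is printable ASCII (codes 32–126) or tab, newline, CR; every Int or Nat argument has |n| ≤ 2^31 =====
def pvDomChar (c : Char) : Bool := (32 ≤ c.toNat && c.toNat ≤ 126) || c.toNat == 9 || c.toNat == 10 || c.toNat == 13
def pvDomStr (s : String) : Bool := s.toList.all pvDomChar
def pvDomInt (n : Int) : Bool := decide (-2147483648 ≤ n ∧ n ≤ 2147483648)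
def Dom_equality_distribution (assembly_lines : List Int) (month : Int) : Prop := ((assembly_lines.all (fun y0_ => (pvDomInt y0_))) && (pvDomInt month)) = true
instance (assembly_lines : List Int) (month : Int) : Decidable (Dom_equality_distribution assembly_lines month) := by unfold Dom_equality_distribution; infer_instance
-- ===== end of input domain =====

-- B replaces A's unconditional month-by-month simulation by simulation with cycle
-- detection: the step preserves the total sum, so the state sequence is eventually
-- periodic; B memoises every state in a dict and on the first repeat jumps ahead by
-- (month - k) % period steps.  Both Pythons mutate the input list in place; the
-- equivalence proved here is about the returned value.

-- ===== PORT A =====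
-- one iteration of A's inner `for i in range(n)` body: conditional +1 update, then argmax compare
def eqA_inner (mi : Nat) (st : List Int × Nat) (i : Nat) : List Int × Nat :=
  let ls := if i ≠ mi then st.1.set i (st.1.getD i 0 + 1) else st.1
  (ls, if ls.getD i 0 > ls.getD st.2 0 then i else st.2)

-- one iteration of A's `for _ in range(month)` body
def eqA_month (n : Nat) (st : List Int × Nat) : List Int × Nat :=
  let ls1 := st.1.set st.2 (st.1.getD st.2 0 - ((n : Int) - 1))
  (List.range n).foldl (eqA_inner st.2) (ls1, 0)

def equality_distribution (assembly_lines : List Int) (month : Int) : List Int :=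
  let n := assembly_lines.length
  let mi0 := (List.range' 1 (n - 1)).foldl
    (fun mi i => if assembly_lines.getD mi 0 < assembly_lines.getD i 0 then i else mi) 0
  ((List.range month.toNat).foldl (fun st _ => eqA_month n st) (assembly_lines, mi0)).1

-- ===== PORT B =====
-- B's step: m = v.index(max(v)); v = [x + 1 for x in v]; v[m] -= n
-- (max()/index() on an empty list raise in Python; such inputs are outside Pre_, the .getD 0 is dead there)
def eqStep (n : Nat) (v : List Int) : List Int :=
  let m := ((PySem.List.max? v (fun x => x)).bind (fun mx => PySem.List.index? v mx)).getD 0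
  let w := v.map (· + 1)
  w.set m (w.getD m 0 - (n : Int))

-- B's `while k < month` loop: fuel counts the at most month.toNat remaining iterations;
-- `seen` memoises every state with the step index at which it occurred
def eqLoop (n : Nat) (month : Int) (fuel : Nat) (v : List Int) (seen : PySem.Dict (List Int) Int) (k : Int) : List Int :=
  match fuel with
  | 0 => v
  | fuel + 1 =>
    match seen.get? v with
    | some j =>
        let period := k - j
        (List.range (PySem.Int.mod (month - k) period).toNat).foldl (fun v _ => eqStep n v) v
    | none => eqLoop n month fuel (eqStep n v) (seen.insert v k) (k + 1)

def equality_distribution_alt (assembly_lines : List Int) (month : Int) : List Int :=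
  eqLoop assembly_lines.length month month.toNat assembly_lines PySem.Dict.empty 0

-- ===== PRECONDITION & SPEC =====
-- Pre_ excludes only the inputs where Python A raises IndexError (empty list with month ≥ 1,
-- where A indexes assembly_lines[0]); Python B raises ValueError (max of empty) there.
def Pre_equality_distribution (assembly_lines : List Int) (month : Int) : Prop :=
  assembly_lines ≠ [] ∨ month ≤ 0
instance (assembly_lines : List Int) (month : Int) : Decidable (Pre_equality_distribution assembly_lines month) := by unfold Pre_equality_distribution; infer_instance

def pvWitness_equality_distribution : List Int × Int := ([3, 1, 4, 1, 5], 4)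

def Spec_equality_distribution (assembly_lines : List Int) (month : Int) (out : List Int) : Prop := out = equality_distribution_alt assembly_lines month
instance (assembly_lines : List Int) (month : Int) (out : List Int) : Decidable (Spec_equality_distribution assembly_lines month out) := by unfold Spec_equality_distribution; infer_instance

-- ===== CLAIM (what is proved, stated in full; the proofs are below) =====
def Claim_equal_equality_distribution : Prop := ∀ (assembly_lines : List Int) (month : Int), Dom_equality_distribution assembly_lines month → Pre_equality_distribution assembly_lines month → Spec_equality_distribution assembly_lines month (equality_distribution assembly_lines month)

-- ===== LEMMAS AND PROOFS =====

-- proof-side first-argmax scan (the value A's max_index and B's v.index(max(v)) both compute)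
def eqB_argmax (v : List Int) : Nat :=
  (List.range' 1 (v.length - 1)).foldl
    (fun m i => if v.getD i 0 > v.getD m 0 then i else m) 0

-- proof-side "shifted" step: subtract n from the first maximal line
def eqB_step (n : Nat) (v : List Int) : List Int :=
  let m := eqB_argmax v
  v.set m (v.getD m 0 - (n : Int))

-- proof-side abbreviation for the argmax comparison step
def eqCmp (w : List Int) (m i : Nat) : Nat := if w.getD i 0 > w.getD m 0 then i else m

-- partially-updated list after A's inner loop has processed indices < k
def eqPart (ls1 : List Int) (mi k : Nat) : List Int :=
  ls1.mapIdx (fun j x => if j < k ∧ j ≠ mi then x + 1 else x)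

lemma foldl_cmp_mem (w : List Int) (l : List Nat) (m : Nat) :
    l.foldl (eqCmp w) m = m ∨ l.foldl (eqCmp w) m ∈ l := by
  induction l generalizing m with
  | nil => exact Or.inl rfl
  | cons a t ih =>
    simp only [List.foldl_cons]
    rcases ih (eqCmp w m a) with h | h
    · rw [h]; unfold eqCmp; split
      · exact Or.inr List.mem_cons_self
      · exact Or.inl rfl
    · exact Or.inr (List.mem_cons_of_mem _ h)

lemma foldl_cmp_shift (v : List Int) (c : Int) (l : List Nat) (m : Nat)
    (hl : ∀ i ∈ l, i < v.length) (hm : m < v.length) :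
    l.foldl (eqCmp (v.map (· + c))) m = l.foldl (eqCmp v) m := by
  induction l generalizing m with
  | nil => rfl
  | cons a t ih =>
    have ha : a < v.length := hl a List.mem_cons_self
    have step : eqCmp (v.map (· + c)) m a = eqCmp v m a := by
      unfold eqCmp
      rw [List.getD_eq_getElem _ 0 (by simpa using ha), List.getD_eq_getElem _ 0 (by simpa using hm),
          List.getD_eq_getElem _ 0 ha, List.getD_eq_getElem _ 0 hm]
      simp only [List.getElem_map]
      by_cases h : v[m] < v[a] <;> simp [h, gt_iff_lt]
    simp only [List.foldl_cons, step]
    have hma : eqCmp v m a < v.length := by unfold eqCmp; split <;> assumption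
    exact ih _ (fun i hi => hl i (List.mem_cons_of_mem _ hi)) hma

lemma eqB_argmax_shift (v : List Int) (c : Int) :
    eqB_argmax (v.map (· + c)) = eqB_argmax v := by
  unfold eqB_argmax
  rcases Nat.eq_zero_or_pos v.length with h | h
  · simp [h]
  · show (List.range' 1 _).foldl (eqCmp (v.map (· + c))) 0 = (List.range' 1 _).foldl (eqCmp v) 0
    rw [List.length_map]
    exact foldl_cmp_shift v c _ 0 (fun i hi => by have := List.mem_range'.mp hi; omega) h

lemma eqB_argmax_lt (v : List Int) (h : 0 < v.length) : eqB_argmax v < v.length := by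
  unfold eqB_argmax
  show (List.range' 1 _).foldl (eqCmp v) 0 < v.length
  rcases foldl_cmp_mem v (List.range' 1 (v.length - 1)) 0 with hh | hh
  · omega
  · have := List.mem_range'.mp hh; omega

lemma range_cmp_eq_argmax (w : List Int) (h : 0 < w.length) :
    (List.range w.length).foldl (eqCmp w) 0 = eqB_argmax w := by
  obtain ⟨m, hm⟩ : ∃ m, w.length = m + 1 := ⟨w.length - 1, by omega⟩
  rw [List.range_eq_range', hm, List.range'_succ]
  simp only [List.foldl_cons]
  have h0 : eqCmp w 0 0 = 0 := by unfold eqCmp; simp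
  rw [h0]
  unfold eqB_argmax
  rw [hm]
  rfl

lemma eqPart_length (ls1 : List Int) (mi k : Nat) : (eqPart ls1 mi k).length = ls1.length := by
  simp [eqPart]

lemma eqPart_getD_agree (ls1 : List Int) (mi : Nat) (k k' j : Nat)
    (hj : j < k) (hjk' : j < k') (hjn : j < ls1.length) :
    (eqPart ls1 mi k).getD j 0 = (eqPart ls1 mi k').getD j 0 := by
  rw [List.getD_eq_getElem _ 0 (by rw [eqPart_length]; exact hjn),
      List.getD_eq_getElem _ 0 (by rw [eqPart_length]; exact hjn)]
  simp only [eqPart, List.getElem_mapIdx]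
  split_ifs <;> first | rfl | omega

-- A's inner loop invariant
lemma inner_fold (ls1 : List Int) (mi : Nat) (fl : List Int)
    (hfl : fl = eqPart ls1 mi ls1.length) :
    ∀ k, k ≤ ls1.length →
      (List.range k).foldl (eqA_inner mi) (ls1, 0)
        = (eqPart ls1 mi k, (List.range k).foldl (eqCmp fl) 0) := by
  intro k hk
  induction k with
  | zero =>
    simp only [List.range_zero, List.foldl_nil]
    refine Prod.ext ?_ rfl
    apply List.ext_getElem (by simp [eqPart])
    intro j h1 h2
    simp [eqPart]
  | succ k ih =>
    have hk' : k ≤ ls1.length := by omega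
    have hklt : k < ls1.length := by omega
    rw [List.range_succ, List.foldl_append, List.foldl_append, ih hk']
    set mk := (List.range k).foldl (eqCmp fl) 0 with hmk
    have hmklt : mk < k + 1 := by
      rcases foldl_cmp_mem fl (List.range k) 0 with hh | hh
      · omega
      · have := List.mem_range.mp hh; omega
    simp only [List.foldl_cons, List.foldl_nil]
    unfold eqA_inner
    simp only []
    have hls' : (if k ≠ mi then (eqPart ls1 mi k).set k ((eqPart ls1 mi k).getD k 0 + 1)
        else eqPart ls1 mi k) = eqPart ls1 mi (k+1) := by
      have hgk : (eqPart ls1 mi k).getD k 0 = ls1[k] := by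
        rw [List.getD_eq_getElem _ 0 (by rw [eqPart_length]; exact hklt)]
        simp only [eqPart, List.getElem_mapIdx]
        split_ifs <;> first | rfl | omega
      split_ifs with hkm
      · apply List.ext_getElem (by simp [eqPart])
        intro j h1 h2
        have h2' : j < ls1.length := by simpa [eqPart] using h2
        rw [List.getElem_set]
        by_cases hjk : k = j
        · subst hjk
          rw [if_pos rfl, hgk]
          simp only [eqPart, List.getElem_mapIdx]
          split_ifs <;> first | rfl | omega
        · rw [if_neg hjk]
          simp only [eqPart, List.getElem_mapIdx]
          split_ifs <;> first | rfl | omega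
      · apply List.ext_getElem (by simp [eqPart])
        intro j h1 h2
        simp only [eqPart, List.getElem_mapIdx]
        split_ifs <;> first | rfl | omega
    rw [hls']
    refine Prod.ext rfl ?_
    show (if (eqPart ls1 mi (k+1)).getD k 0 > (eqPart ls1 mi (k+1)).getD mk 0 then k else mk)
        = eqCmp fl mk k
    have e1 : (eqPart ls1 mi (k+1)).getD k 0 = fl.getD k 0 := by
      rw [hfl]; exact eqPart_getD_agree ls1 mi (k+1) ls1.length k (by omega) hklt hklt
    have e2 : (eqPart ls1 mi (k+1)).getD mk 0 = fl.getD mk 0 := by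
      rw [hfl]; exact eqPart_getD_agree ls1 mi (k+1) ls1.length mk hmklt (by omega) (by omega)
    rw [e1, e2]; rfl

lemma eqB_step_length (n : Nat) (v : List Int) : (eqB_step n v).length = v.length := by
  simp [eqB_step]

lemma month_step (v : List Int) (t : Int) (hne : 0 < v.length) :
    eqA_month v.length (v.map (· + t), eqB_argmax v)
      = ((eqB_step v.length v).map (· + (t+1)), eqB_argmax (eqB_step v.length v)) := by
  have hmi : eqB_argmax v < v.length := eqB_argmax_lt v hne
  have hgdv : v.getD (eqB_argmax v) 0 = v[eqB_argmax v] := List.getD_eq_getElem v 0 hmi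
  have hgd : (v.map (· + t)).getD (eqB_argmax v) 0 = v[eqB_argmax v] + t := by
    rw [List.getD_eq_getElem _ 0 (by simpa using hmi)]; simp
  unfold eqA_month
  simp only [hgd]
  have hls1len : ((v.map (· + t)).set (eqB_argmax v) (v[eqB_argmax v] + t - ((v.length : Int) - 1))).length = v.length := by
    simp
  set ls1 := (v.map (· + t)).set (eqB_argmax v) (v[eqB_argmax v] + t - ((v.length : Int) - 1)) with hls1
  have hkey : eqPart ls1 (eqB_argmax v) ls1.length = (eqB_step v.length v).map (· + (t+1)) := by
    apply List.ext_getElem (by simp [eqPart, hls1len, eqB_step])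
    intro j h1 h2
    have hjn : j < v.length := by simpa [eqPart, hls1len] using h1
    simp only [eqPart, List.getElem_mapIdx, eqB_step, List.getElem_map, List.getElem_set,
      List.length_set, List.length_map, hls1, hgdv]
    by_cases hjm : eqB_argmax v = j
    · rw [if_pos hjm, if_pos hjm]
      rw [if_neg (by omega : ¬(j < v.length ∧ j ≠ eqB_argmax v))]
      ring
    · rw [if_neg hjm, if_neg hjm]
      rw [if_pos ⟨hjn, by omega⟩]
      ring
  have hin := inner_fold ls1 (eqB_argmax v) (eqPart ls1 (eqB_argmax v) ls1.length) rfl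
      ls1.length le_rfl
  rw [show List.range ls1.length = List.range v.length from by rw [hls1len]] at hin
  rw [hin]
  have hfl_len : (eqPart ls1 (eqB_argmax v) ls1.length).length = v.length := by
    rw [eqPart_length, hls1len]
  refine Prod.ext ?_ ?_
  · show eqPart ls1 (eqB_argmax v) ls1.length = _
    rw [hkey]
  · show (List.range v.length).foldl (eqCmp (eqPart ls1 (eqB_argmax v) ls1.length)) 0 = _
    have hr : (List.range v.length).foldl (eqCmp (eqPart ls1 (eqB_argmax v) ls1.length)) 0
        = eqB_argmax (eqPart ls1 (eqB_argmax v) ls1.length) := by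
      conv_lhs => rw [show List.range v.length = List.range (eqPart ls1 (eqB_argmax v) ls1.length).length from by rw [hfl_len]]
      exact range_cmp_eq_argmax _ (by rw [hfl_len]; exact hne)
    rw [hr, hkey]
    exact eqB_argmax_shift (eqB_step v.length v) (t+1)

lemma iter_length (v0 : List Int) (n : Nat) (k : Nat) :
    ((List.range k).foldl (fun v _ => eqB_step n v) v0).length = v0.length := by
  induction k with
  | zero => rfl
  | succ k ih =>
    rw [List.range_succ, List.foldl_append, List.foldl_cons, List.foldl_nil,
      eqB_step_length, ih]

lemma month_iter (v0 : List Int) (h : 0 < v0.length) (k : Nat) :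
    (List.range k).foldl (fun st _ => eqA_month v0.length st) (v0, eqB_argmax v0)
      = (((List.range k).foldl (fun v _ => eqB_step v0.length v) v0).map (· + (k : Int)),
         eqB_argmax ((List.range k).foldl (fun v _ => eqB_step v0.length v) v0)) := by
  induction k with
  | zero =>
    simp only [List.range_zero, List.foldl_nil, Nat.cast_zero]
    refine Prod.ext ?_ rfl
    apply List.ext_getElem (by simp)
    intro j h1 h2; simp
  | succ k ih =>
    rw [List.range_succ, List.foldl_append, List.foldl_append, ih]
    simp only [List.foldl_cons, List.foldl_nil]
    set wk := (List.range k).foldl (fun v _ => eqB_step v0.length v) v0 with hwk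
    have hwlen : wk.length = v0.length := iter_length v0 v0.length k
    have hwpos : 0 < wk.length := by omega
    have hms := month_step wk (k : Int) hwpos
    rw [hwlen] at hms
    rw [hms]
    simp

-- ----- B-side lemmas -----

-- the fold over range' 1 k computes the first argmax of the prefix 0..k
lemma argmax_fold_spec (v : List Int) (k : Nat) :
    (List.range' 1 k).foldl (eqCmp v) 0 < k + 1 ∧
    (∀ j, j ≤ k → v.getD j 0 ≤ v.getD ((List.range' 1 k).foldl (eqCmp v) 0) 0) ∧
    (∀ j, j < (List.range' 1 k).foldl (eqCmp v) 0 → v.getD j 0 < v.getD ((List.range' 1 k).foldl (eqCmp v) 0) 0) := by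
  induction k with
  | zero =>
    simp only [List.range'_zero, List.foldl_nil]
    refine ⟨by omega, ?_, by omega⟩
    intro j hj
    have : j = 0 := by omega
    subst this; exact le_refl _
  | succ k ih =>
    obtain ⟨hlt, hle, hstrict⟩ := ih
    rw [List.range'_concat, List.foldl_append]
    simp only [List.foldl_cons, List.foldl_nil, one_mul]
    set m := (List.range' 1 k).foldl (eqCmp v) 0 with hm
    unfold eqCmp
    split_ifs with hgt
    · refine ⟨by omega, ?_, ?_⟩
      · intro j hj
        rcases Nat.lt_or_ge j (k + 1) with h | h
        · exact le_trans (hle j (by omega)) (le_of_lt hgt)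
        · have hj1 : j = 1 + k := by omega
          subst hj1; exact le_refl _
      · intro j hj
        exact lt_of_le_of_lt (hle j (by omega)) hgt
    · refine ⟨by omega, ?_, hstrict⟩
      intro j hj
      rcases Nat.lt_or_ge j (k + 1) with h | h
      · exact hle j (by omega)
      · have hj1 : j = 1 + k := by omega
        subst hj1; exact not_lt.mp hgt

lemma eqB_argmax_spec (v : List Int) :
    (∀ j, j < v.length → v.getD j 0 ≤ v.getD (eqB_argmax v) 0) ∧
    (∀ j, j < eqB_argmax v → v.getD j 0 < v.getD (eqB_argmax v) 0) := by
  obtain ⟨h1, h2, h3⟩ := argmax_fold_spec v (v.length - 1)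
  exact ⟨fun j hj => h2 j (by omega), h3⟩

lemma index_max_eq_argmax (v : List Int) (h : v ≠ []) :
    ((PySem.List.max? v (fun x => x)).bind (fun mx => PySem.List.index? v mx)).getD 0
      = eqB_argmax v := by
  have hpos : 0 < v.length := List.length_pos_iff.mpr h
  obtain ⟨spec_le, spec_lt⟩ := eqB_argmax_spec v
  have ha : eqB_argmax v < v.length := eqB_argmax_lt v hpos
  obtain ⟨M, hM⟩ : ∃ M, PySem.List.max? v (fun x => x) = some M := by
    cases hmx : PySem.List.max? v (fun x => x) with
    | none => exact absurd ((PySem.List.max?_eq_none_iff v (fun x => x)).mp hmx) h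
    | some M => exact ⟨M, rfl⟩
  have hmem : M ∈ v := PySem.List.max?_mem hM
  have hmax : ∀ y ∈ v, y ≤ M := PySem.List.max?_isMax hM
  have hMa : M = v[eqB_argmax v] := by
    have h1 : M ≤ v[eqB_argmax v] := by
      obtain ⟨i, hi, hvi⟩ := List.mem_iff_getElem.mp hmem
      have := spec_le i hi
      rw [List.getD_eq_getElem _ 0 hi, List.getD_eq_getElem _ 0 ha] at this
      omega
    have h2 : v[eqB_argmax v] ≤ M := hmax _ (List.getElem_mem ha)
    omega
  have hidx : PySem.List.index? v M = some (eqB_argmax v) := by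
    rw [PySem.List.index?_eq_some_iff]
    refine ⟨v.take (eqB_argmax v), v.drop (eqB_argmax v + 1), ?_, ?_, ?_⟩
    · conv_lhs => rw [← List.take_append_drop (eqB_argmax v) v]
      rw [← List.getElem_cons_drop ha, hMa]
    · rw [List.length_take]; omega
    · intro hMin
      obtain ⟨i, hi, hvi⟩ := List.mem_iff_getElem.mp hMin
      have hilt : i < eqB_argmax v := by
        have := hi; rw [List.length_take] at this; omega
      rw [List.getElem_take] at hvi
      have := spec_lt i hilt
      rw [List.getD_eq_getElem _ 0 (by omega), List.getD_eq_getElem _ 0 ha] at this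
      omega
  rw [hM, show ((some M).bind fun mx => PySem.List.index? v mx) = PySem.List.index? v M from rfl,
    hidx]
  rfl

lemma eqStep_shift (u : List Int) (c : Int) (h : u ≠ []) :
    eqStep u.length (u.map (· + c)) = (eqB_step u.length u).map (· + (c + 1)) := by
  have hpos : 0 < u.length := List.length_pos_iff.mpr h
  have hne' : u.map (· + c) ≠ [] := by simpa using h
  have ha : eqB_argmax u < u.length := eqB_argmax_lt u hpos
  have hm : ((PySem.List.max? (u.map (· + c)) (fun x => x)).bind
      (fun mx => PySem.List.index? (u.map (· + c)) mx)).getD 0 = eqB_argmax u := by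
    rw [index_max_eq_argmax _ hne', eqB_argmax_shift]
  simp only [eqStep, eqB_step, hm]
  apply List.ext_getElem (by simp)
  intro j h1 h2
  have hju : j < u.length := by simpa using h1
  have hgd : ((u.map (· + c)).map (· + 1)).getD (eqB_argmax u) 0 = u[eqB_argmax u] + c + 1 := by
    rw [List.getD_eq_getElem _ 0 (by simpa using ha)]
    simp only [List.getElem_map]
  have hgd2 : u.getD (eqB_argmax u) 0 = u[eqB_argmax u] := List.getD_eq_getElem u 0 ha
  simp only [List.getElem_set, List.getElem_map]
  by_cases hjm : eqB_argmax u = j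
  · rw [if_pos hjm, if_pos hjm, hgd, hgd2]; ring
  · rw [if_neg hjm, if_neg hjm]; ring

lemma iter_split (n : Nat) (a b : Nat) (v : List Int) :
    (List.range (a + b)).foldl (fun v _ => eqStep n v) v
      = (List.range b).foldl (fun v _ => eqStep n v) ((List.range a).foldl (fun v _ => eqStep n v) v) := by
  induction b with
  | zero => rfl
  | succ b ih =>
    rw [show a + (b + 1) = (a + b) + 1 from rfl, List.range_succ, List.foldl_append, ih,
      List.range_succ, List.foldl_append]
    simp only [List.foldl_cons, List.foldl_nil]

lemma stepB_iter_eq (v0 : List Int) (h : v0 ≠ []) (k : Nat) :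
    (List.range k).foldl (fun v _ => eqStep v0.length v) v0
      = ((List.range k).foldl (fun v _ => eqB_step v0.length v) v0).map (· + (k : Int)) := by
  induction k with
  | zero =>
    simp only [List.range_zero, List.foldl_nil, Nat.cast_zero]
    apply List.ext_getElem (by simp)
    intro j h1 h2; simp
  | succ k ih =>
    rw [List.range_succ, List.foldl_append, ih]
    simp only [List.foldl_cons, List.foldl_nil]
    set wk := (List.range k).foldl (fun v _ => eqB_step v0.length v) v0 with hwk
    have hwlen : wk.length = v0.length := iter_length v0 v0.length k
    have hwne : wk ≠ [] := by
      have : 0 < wk.length := by rw [hwlen]; exact List.length_pos_iff.mpr h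
      exact List.length_pos_iff.mp this
    have hss := eqStep_shift wk (k : Int) hwne
    rw [hwlen] at hss
    rw [hss, List.foldl_append]
    simp only [List.foldl_cons, List.foldl_nil]
    rw [← hwk]
    push_cast
    rfl

lemma iter_periodic (n : Nat) (x : List Int) (a p : Nat)
    (hcyc : (List.range a).foldl (fun v _ => eqStep n v) x
          = (List.range (a + p)).foldl (fun v _ => eqStep n v) x) :
    ∀ m, a ≤ m →
      (List.range m).foldl (fun v _ => eqStep n v) x
        = (List.range (m + p)).foldl (fun v _ => eqStep n v) x := by
  intro m hm
  obtain ⟨t, rfl⟩ := Nat.exists_eq_add_of_le hm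
  rw [iter_split n a t x, show a + t + p = (a + p) + t by omega, iter_split n (a + p) t x, ← hcyc]

lemma iter_periodic_mul (n : Nat) (x : List Int) (a p : Nat)
    (hcyc : (List.range a).foldl (fun v _ => eqStep n v) x
          = (List.range (a + p)).foldl (fun v _ => eqStep n v) x) :
    ∀ q m, a ≤ m →
      (List.range (m + q * p)).foldl (fun v _ => eqStep n v) x
        = (List.range m).foldl (fun v _ => eqStep n v) x := by
  intro q
  induction q with
  | zero => intro m hm; simp
  | succ q ih =>
    intro m hm
    rw [show m + (q + 1) * p = (m + p) + q * p by ring, ih (m + p) (by omega)]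
    exact (iter_periodic n x a p hcyc m hm).symm

-- the loop with memo dict computes the plain iterate
lemma eqLoop_correct (v0 : List Int) (month : Int) :
    ∀ (fuel : Nat) (v : List Int) (seen : PySem.Dict (List Int) Int) (k : Int),
      0 ≤ k → k + fuel = month →
      v = (List.range k.toNat).foldl (fun v _ => eqStep v0.length v) v0 →
      (∀ s j, seen.get? s = some j → 0 ≤ j ∧ j < k ∧
        s = (List.range j.toNat).foldl (fun v _ => eqStep v0.length v) v0) →
      eqLoop v0.length month fuel v seen k
        = (List.range month.toNat).foldl (fun v _ => eqStep v0.length v) v0 := by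
  intro fuel
  induction fuel with
  | zero =>
    intro v seen k hk0 hkf hv hseen
    simp only [eqLoop]
    rw [hv]
    congr 2
    omega
  | succ fuel ih =>
    intro v seen k hk0 hkf hv hseen
    simp only [eqLoop]
    cases hget : seen.get? v with
    | none =>
      apply ih (eqStep v0.length v) (seen.insert v k) (k + 1) (by omega) (by omega)
      · rw [hv]
        have hk1 : (k + 1).toNat = k.toNat + 1 := by omega
        rw [hk1, List.range_succ, List.foldl_append]
        simp only [List.foldl_cons, List.foldl_nil]
      · intro s j hsj
        rw [PySem.Dict.get?_insert] at hsj
        by_cases hs : s = v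
        · rw [if_pos hs] at hsj
          injection hsj with hjk
          subst hjk
          exact ⟨hk0, by omega, by rw [hs, hv]⟩
        · rw [if_neg hs] at hsj
          obtain ⟨a, b, c⟩ := hseen s j hsj
          exact ⟨a, by omega, c⟩
    | some j =>
      obtain ⟨hj0, hjk, hs⟩ := hseen v j hget
      simp only []
      have hp : (0 : Int) < k - j := by omega
      set rem := PySem.Int.mod (month - k) (k - j) with hremdef
      have hrem0 : (0 : Int) ≤ rem := PySem.Int.mod_nonneg _ hp
      have hremlt : rem < k - j := PySem.Int.mod_lt _ hp
      have hq := PySem.Int.floordiv_mul_add_mod (month - k) (k - j)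
      set q := PySem.Int.floordiv (month - k) (k - j) with hqdef
      have hmk : (1 : Int) ≤ month - k := by omega
      have hq0 : (0 : Int) ≤ q := by
        by_cases hok : (0 : Int) ≤ q
        · exact hok
        · have hqc : q < 0 := by omega
          have hle : q * (k - j) ≤ (-1) * (k - j) :=
            mul_le_mul_of_nonneg_right (by omega) (by omega)
          linarith
      have hQ : ((q.toNat * (k - j).toNat : Nat) : Int) = month - k - rem := by
        push_cast
        rw [Int.toNat_of_nonneg hq0, Int.toNat_of_nonneg (by omega : (0:Int) ≤ k - j)]
        linarith
      have hcast : month.toNat = (k.toNat + rem.toNat) + q.toNat * (k - j).toNat := by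
        omega
      have hcyc : (List.range j.toNat).foldl (fun v _ => eqStep v0.length v) v0
          = (List.range (j.toNat + (k - j).toNat)).foldl (fun v _ => eqStep v0.length v) v0 := by
        have hjt : j.toNat + (k - j).toNat = k.toNat := by omega
        rw [hjt, ← hv, ← hs]
      rw [hv, ← iter_split, hcast]
      exact (iter_periodic_mul v0.length v0 j.toNat (k - j).toNat hcyc q.toNat
        (k.toNat + rem.toNat) (by omega)).symm

-- ===== VERDICT (by name: the statement is the Claim_ definition above) =====
theorem equality_distribution_spec : Claim_equal_equality_distribution := by
  intro lines month _ hpre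
  unfold Spec_equality_distribution
  by_cases hm : month ≤ 0
  · have ht : month.toNat = 0 := Int.toNat_of_nonpos hm
    simp [equality_distribution, equality_distribution_alt, eqLoop, ht]
  · have hne : lines ≠ [] := by
      rcases hpre with h | h
      · exact h
      · omega
    have hpos : 0 < lines.length := List.length_pos_iff.mpr hne
    unfold equality_distribution
    simp only []
    have hm0 : (List.range' 1 (lines.length - 1)).foldl
        (fun mi i => if lines.getD mi 0 < lines.getD i 0 then i else mi) 0 = eqB_argmax lines := rfl
    rw [hm0, month_iter lines hpos month.toNat]
    unfold equality_distribution_alt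
    rw [eqLoop_correct lines month month.toNat lines PySem.Dict.empty 0 le_rfl
        (by omega) (by simp) (by intro s j h; simp [PySem.Dict.get?_empty] at h)]
    rw [stepB_iter_eq lines hne month.toNat]
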